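-- pv_equiv track=rewrite | github.com/ceccopierangiolieugenio/pyTermTk | tests/timeit/15.strings.01.re.loop.py | process1_1
-- ===== SOURCE A (Python) =====
-- def process1_1(txt):
--     _lines = []
--     _cursor = (1,1)
--     lines = txt.split('A')
--     for i,l in enumerate(lines):
--         if i:
--             _lines.append("")
--             _cursor = (0,len(_lines)-1)
--         ls = l.split('B')
--         for ii,ll in enumerate(ls):
--             if ii:
--                 _cursor = (0,len(_lines)-1)
--             lls = ll.split('C')
--             for iii,lll in enumerate(lls):
--                 if iii:
--                     x,y = _cursor
--                     _cursor = (max(0,x-1),y)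
--                 _lines.append(lll)
--     return len(lines) +_cursor[0] + _cursor[1]
-- ===== SOURCE B (Python) =====
-- def process1_1(txt):
--     n = 1
--     cx, cy = 1, 1
--     for ch in txt:
--         if ch == 'A':
--             n += 1
--             cx, cy = 0, n - 1
--             n += 1
--         elif ch == 'B':
--             cx, cy = 0, n - 1
--             n += 1
--         elif ch == 'C':
--             cx = max(0, cx - 1)
--             n += 1
--     return txt.count('A') + 1 + cx + cy
-- ===== Notes on version B (the rewrite author's own statement) =====
-- stated objective: alternative
-- what changed: Replaces the three nested split()-and-enumerate passes that materialize a growing list of line fragments with a single left-to-right character scan keeping only an integer line counter and the cursor pair; no list is ever built (O(1) extra space, though CPython's C-level str.split makes A's constant factor smaller).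
import Mathlib
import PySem

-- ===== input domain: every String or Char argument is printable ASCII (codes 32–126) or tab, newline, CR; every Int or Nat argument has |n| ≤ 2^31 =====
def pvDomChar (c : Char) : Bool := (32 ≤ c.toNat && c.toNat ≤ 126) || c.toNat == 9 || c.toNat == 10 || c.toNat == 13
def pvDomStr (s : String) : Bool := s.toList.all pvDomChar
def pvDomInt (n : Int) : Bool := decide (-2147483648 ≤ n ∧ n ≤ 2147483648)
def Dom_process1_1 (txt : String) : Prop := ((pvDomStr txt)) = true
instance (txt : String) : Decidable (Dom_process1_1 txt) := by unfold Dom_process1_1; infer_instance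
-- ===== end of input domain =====

-- B replaces A's three nested split/enumerate passes (which build a list of fragments) by a
-- single character scan carrying only a line counter and the cursor pair (constant extra space;
-- no speed claim: in CPython A's C-level str.split gives it the smaller constant factor).

-- ===== PORT A =====
-- innermost loop body: for iii,lll in enumerate(lls): if iii: dec cursor; _lines.append(lll)
def procC (st : List (List Char) × Int × Int) (ip : Int × List Char) :
    List (List Char) × Int × Int :=
  let st := if ip.1 ≠ 0 then (st.1, max 0 (st.2.1 - 1), st.2.2) else st
  (st.1 ++ [ip.2], st.2.1, st.2.2)

-- middle loop body: for ii,ll in enumerate(ls): if ii: cursor=(0,len-1); then split('C') loop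
def procB (st : List (List Char) × Int × Int) (ip : Int × List Char) :
    List (List Char) × Int × Int :=
  let st := if ip.1 ≠ 0 then (st.1, 0, (st.1.length : Int) - 1) else st
  (PySem.List.enumerate (PySem.Chars.splitOn ip.2 ['C'])).foldl procC st

-- outer loop body: for i,l in enumerate(lines): if i: append ""; cursor=(0,len-1); then split('B') loop
def procA (st : List (List Char) × Int × Int) (ip : Int × List Char) :
    List (List Char) × Int × Int :=
  let st := if ip.1 ≠ 0 then
      (let ls := st.1 ++ [[]]; (ls, 0, (ls.length : Int) - 1))
    else st
  (PySem.List.enumerate (PySem.Chars.splitOn ip.2 ['B'])).foldl procB st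

def process1_1 (txt : String) : Int :=
  let lines := PySem.Chars.splitOn txt.toList ['A']
  let st := (PySem.List.enumerate lines).foldl procA ([], 1, 1)
  (lines.length : Int) + st.2.1 + st.2.2

-- ===== PORT B =====
-- one step of Source B's scan; state = (n, cx, cy)
def stepScan (a : Int × Int × Int) (ch : Char) : Int × Int × Int :=
  if ch = 'A' then
    let n := a.1 + 1
    (n + 1, 0, n - 1)
  else if ch = 'B' then (a.1 + 1, 0, a.1 - 1)
  else if ch = 'C' then (a.1 + 1, max 0 (a.2.1 - 1), a.2.2)
  else a

def process1_1_alt (txt : String) : Int :=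
  let st := txt.toList.foldl stepScan (1, 1, 1)
  ((PySem.Str.count txt "A" : Int)) + 1 + st.2.1 + st.2.2

-- ===== PRECONDITION & SPEC =====
def Spec_process1_1 (txt : String) (out : Int) : Prop := out = process1_1_alt txt
instance (txt : String) (out : Int) : Decidable (Spec_process1_1 txt out) := by
  unfold Spec_process1_1; infer_instance

-- ===== CLAIM (what is proved, stated in full; the proofs are below) =====
def Claim_equal_process1_1 : Prop := ∀ (txt : String), Dom_process1_1 txt → Spec_process1_1 txt (process1_1 txt)

-- ===== LEMMAS AND PROOFS =====

-- structural single-character split: splitP c l = (first piece, remaining pieces)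
def splitP (c : Char) : List Char → List Char × List (List Char)
  | [] => ([], [])
  | x :: xs =>
    let r := splitP c xs
    if x = c then ([], r.1 :: r.2) else (x :: r.1, r.2)

lemma splitOn_go_single (c : Char) : ∀ (fuel : Nat) (l cur : List Char) (acc : List (List Char)),
    l.length < fuel →
    PySem.Chars.splitOn.go [c] fuel l cur acc =
      acc.reverse ++ (cur.reverse ++ (splitP c l).1) :: (splitP c l).2 := by
  intro fuel
  induction fuel with
  | zero => intro l cur acc h; omega
  | succ n ih =>
    intro l cur acc h
    cases l with
    | nil => simp [PySem.Chars.splitOn.go, splitP]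
    | cons x rest =>
      rw [PySem.Chars.splitOn.go]
      by_cases hx : x = c
      · subst hx
        simp only [List.isPrefixOf, BEq.rfl, Bool.and_eq_true,
          and_true, if_pos, List.length_cons, List.length_nil, List.drop_succ_cons, List.drop_zero]
        rw [ih rest [] (cur.reverse :: acc) (by simpa using Nat.lt_of_succ_lt_succ h)]
        simp [splitP]
      · have : [c].isPrefixOf (x :: rest) = false := by
          simp [List.isPrefixOf]; exact fun hh => (hx (by simpa using hh.symm)).elim
        simp only [this, Bool.false_eq_true, if_false]
        rw [ih rest (x :: cur) acc (by simpa using Nat.lt_of_succ_lt_succ h)]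
        simp [splitP, hx]

lemma splitOn_single (c : Char) (l : List Char) :
    PySem.Chars.splitOn l [c] = (splitP c l).1 :: (splitP c l).2 := by
  rw [PySem.Chars.splitOn, splitOn_go_single c (l.length + 1) l [] [] (by omega)]
  simp

lemma count_go_single (c : Char) : ∀ (fuel : Nat) (l : List Char) (acc : Nat),
    l.length ≤ fuel → PySem.Chars.count.go [c] fuel l acc = acc + l.count c := by
  intro fuel
  induction fuel with
  | zero => intro l acc h
            cases l with
            | nil => simp [PySem.Chars.count.go]
            | cons x rest => simp at h
  | succ n ih =>
    intro l acc h
    cases l with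
    | nil => simp [PySem.Chars.count.go]
    | cons x rest =>
      rw [PySem.Chars.count.go]
      by_cases hx : x = c
      · subst hx
        simp only [List.isPrefixOf, BEq.rfl, Bool.and_eq_true, and_true,
          if_pos, List.length_cons, List.length_nil, List.drop_succ_cons, List.drop_zero]
        rw [ih rest (acc + 1) (by simpa using Nat.le_of_succ_le_succ h)]
        simp
        omega
      · have hp : [c].isPrefixOf (x :: rest) = false := by
          simp [List.isPrefixOf]; exact fun hh => (hx (by simpa using hh.symm)).elim
        simp only [hp, Bool.false_eq_true, if_false]
        rw [ih rest acc (by simpa using Nat.le_of_succ_le_succ h)]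
        simp [hx]

lemma count_single (c : Char) (l : List Char) :
    PySem.Chars.count l [c] = l.count c := by
  rw [PySem.Chars.count]
  simp [count_go_single c l.length l 0 (le_refl _)]

lemma splitP_snd_length (c : Char) (l : List Char) :
    (splitP c l).2.length = l.count c := by
  induction l with
  | nil => simp [splitP]
  | cons x rest ih =>
    by_cases hx : x = c
    · subst hx; simp [splitP, ih]
    · simp [splitP, hx, ih]

-- abstraction: forget the fragment list, keep its length
def absSt (st : List (List Char) × Int × Int) : Int × Int × Int :=
  ((st.1.length : Int), st.2.1, st.2.2)

def pC (a : Int × Int × Int) (ip : Int × List Char) : Int × Int × Int :=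
  let a := if ip.1 ≠ 0 then (a.1, max 0 (a.2.1 - 1), a.2.2) else a
  (a.1 + 1, a.2.1, a.2.2)

def pB (a : Int × Int × Int) (ip : Int × List Char) : Int × Int × Int :=
  let a := if ip.1 ≠ 0 then (a.1, 0, a.1 - 1) else a
  (PySem.List.enumerate (PySem.Chars.splitOn ip.2 ['C'])).foldl pC a

def pA (a : Int × Int × Int) (ip : Int × List Char) : Int × Int × Int :=
  let a := if ip.1 ≠ 0 then (a.1 + 1, 0, (a.1 + 1) - 1) else a
  (PySem.List.enumerate (PySem.Chars.splitOn ip.2 ['B'])).foldl pB a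

lemma abs_procC (st : List (List Char) × Int × Int) (ip : Int × List Char) :
    absSt (procC st ip) = pC (absSt st) ip := by
  by_cases h : ip.1 ≠ 0 <;> simp [procC, pC, absSt, h]

lemma abs_procB (st : List (List Char) × Int × Int) (ip : Int × List Char) :
    absSt (procB st ip) = pB (absSt st) ip := by
  have key : ∀ (l : List (Int × List Char)) (s : List (List Char) × Int × Int),
      absSt (l.foldl procC s) = l.foldl pC (absSt s) := by
    intro l s
    exact (List.foldl_hom absSt (fun x y => (abs_procC x y).symm)).symm
  by_cases h : ip.1 ≠ 0
  · simp only [procB, pB, if_pos h]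
    rw [key]
    rfl
  · simp only [procB, pB, if_neg h]
    rw [key]
lemma abs_procA (st : List (List Char) × Int × Int) (ip : Int × List Char) :
    absSt (procA st ip) = pA (absSt st) ip := by
  have key : ∀ (l : List (Int × List Char)) (s : List (List Char) × Int × Int),
      absSt (l.foldl procB s) = l.foldl pB (absSt s) := by
    intro l s
    exact (List.foldl_hom absSt (fun x y => (abs_procB x y).symm)).symm
  by_cases h : ip.1 ≠ 0
  · simp only [procA, pA, if_pos h]
    rw [key]
    congr 1
    simp [absSt]
  · simp only [procA, pA, if_neg h]
    rw [key]
def bump (a : Int × Int × Int) : Int × Int × Int := (a.1 + 1, a.2.1, a.2.2)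

def cstep (a : Int × Int × Int) (ch : Char) : Int × Int × Int :=
  if ch = 'C' then (a.1 + 1, max 0 (a.2.1 - 1), a.2.2) else a

def bstep (a : Int × Int × Int) (ch : Char) : Int × Int × Int :=
  if ch = 'B' then (a.1 + 1, 0, a.1 - 1) else cstep a ch

lemma cstep_bump_comm (a : Int × Int × Int) (ch : Char) :
    cstep (bump a) ch = bump (cstep a ch) := by
  by_cases h : ch = 'C' <;> simp [cstep, bump, h]

lemma bstep_bump_ex (a : Int × Int × Int) (ch : Char) :
    ∃ a', bstep (bump a) ch = bump a' := by
  by_cases h : ch = 'B'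
  · exact ⟨(a.1 + 1, 0, a.1), by simp [bstep, bump, h]⟩
  · exact ⟨cstep a ch, by simp [bstep, h, cstep_bump_comm]⟩
lemma stepScan_eq_bstep (a : Int × Int × Int) (ch : Char) (h : ch ≠ 'A') :
    stepScan a ch = bstep a ch := by
  by_cases hb : ch = 'B'
  · simp [stepScan, bstep, hb]
  · by_cases hc : ch = 'C' <;> simp [stepScan, bstep, cstep, h, hb, hc]

lemma foldl_enumerate_pos {α St : Type} (proc : St → Int × α → St) (g : St → α → St)
    (h : ∀ a p (i : Int), i ≠ 0 → proc a (i, p) = g a p) :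
    ∀ (ps : List α) (a : St) (s : Int), 1 ≤ s →
      (PySem.List.enumerate ps s).foldl proc a = ps.foldl g a := by
  intro ps
  induction ps with
  | nil => intro a s hs; simp [PySem.List.enumerate_nil]
  | cons p rest ih =>
    intro a s hs
    rw [PySem.List.enumerate_cons, List.foldl_cons, List.foldl_cons,
      h a p s (by omega), ih _ (s + 1) (by omega)]

def gC (a : Int × Int × Int) (_ : List Char) : Int × Int × Int :=
  (a.1 + 1, max 0 (a.2.1 - 1), a.2.2)

lemma MC0 : ∀ (l : List Char) (a : Int × Int × Int),
    (splitP 'C' l).2.foldl gC (bump a) = l.foldl cstep (bump a) := by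
  intro l
  induction l with
  | nil => intro a; simp [splitP]
  | cons x rest ih =>
    intro a
    by_cases hx : x = 'C'
    · subst hx
      rw [show splitP 'C' ('C' :: rest) = ([], (splitP 'C' rest).1 :: (splitP 'C' rest).2) from by
        simp [splitP]]
      have h1 : gC (bump a) (splitP 'C' rest).1 = bump (a.1 + 1, max 0 (a.2.1 - 1), a.2.2) := by
        simp [gC, bump]
      have h2 : cstep (bump a) 'C' = bump (a.1 + 1, max 0 (a.2.1 - 1), a.2.2) := by
        simp [cstep, bump]
      rw [List.foldl_cons, List.foldl_cons, h1, h2, ih]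
    · rw [show splitP 'C' (x :: rest) = (x :: (splitP 'C' rest).1, (splitP 'C' rest).2) from by
        simp [splitP, hx]]
      have h2 : cstep (bump a) x = bump a := by simp [cstep, hx]
      rw [List.foldl_cons, h2, ih]
lemma runC_eq (l : List Char) (a : Int × Int × Int) :
    (PySem.List.enumerate (PySem.Chars.splitOn l ['C'])).foldl pC a = l.foldl cstep (bump a) := by
  rw [splitOn_single, PySem.List.enumerate_cons, List.foldl_cons,
    foldl_enumerate_pos pC gC (by intro b p i hi; simp [pC, gC, hi]) _ _ (0 + 1) (by omega)]
  have h0 : pC a (0, (splitP 'C' l).1) = bump a := by simp [pC, bump]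
  rw [h0, MC0]
def gB (a : Int × Int × Int) (p : List Char) : Int × Int × Int :=
  p.foldl cstep (a.1 + 1, 0, a.1 - 1)

lemma MB0 : ∀ (l : List Char) (a : Int × Int × Int),
    (splitP 'B' l).2.foldl gB ((splitP 'B' l).1.foldl cstep (bump a)) = l.foldl bstep (bump a) := by
  intro l
  induction l with
  | nil => intro a; simp [splitP]
  | cons x rest ih =>
    intro a
    by_cases hx : x = 'B'
    · subst hx
      rw [show splitP 'B' ('B' :: rest) = ([], (splitP 'B' rest).1 :: (splitP 'B' rest).2) from by
        simp [splitP]]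
      have h1 : gB (bump a) (splitP 'B' rest).1
          = (splitP 'B' rest).1.foldl cstep (bump (a.1 + 1, 0, a.1)) := by
        simp only [gB, bump]
        ring_nf
      have h2 : bstep (bump a) 'B' = bump (a.1 + 1, 0, a.1) := by
        simp [bstep, bump]
      rw [List.foldl_nil, List.foldl_cons, List.foldl_cons, h1, h2, ih]
    · rw [show splitP 'B' (x :: rest) = (x :: (splitP 'B' rest).1, (splitP 'B' rest).2) from by
        simp [splitP, hx]]
      have h4 : bstep a x = cstep a x := by simp [bstep, hx]
      rw [List.foldl_cons, List.foldl_cons, cstep_bump_comm, ih, ← cstep_bump_comm]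
      congr 1
      simp [bstep, hx]
lemma runB_eq (l : List Char) (a : Int × Int × Int) :
    (PySem.List.enumerate (PySem.Chars.splitOn l ['B'])).foldl pB a = l.foldl bstep (bump a) := by
  have hg : ∀ (b : Int × Int × Int) (p : List Char) (i : Int), i ≠ 0 → pB b (i, p) = gB b p := by
    intro b p i hi
    simp only [pB, gB, if_pos hi, runC_eq]
    simp [bump]
  rw [splitOn_single, PySem.List.enumerate_cons, List.foldl_cons,
    foldl_enumerate_pos pB gB hg _ _ (0 + 1) (by omega)]
  have h0 : pB a (0, (splitP 'B' l).1) = (splitP 'B' l).1.foldl cstep (bump a) := by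
    simp only [pB, if_neg (by omega : ¬ ((0 : Int), (splitP 'B' l).1).1 ≠ 0), runC_eq]
  rw [h0, MB0]
def gA (a : Int × Int × Int) (p : List Char) : Int × Int × Int :=
  p.foldl bstep (a.1 + 2, 0, a.1)

lemma MA0 : ∀ (l : List Char) (a : Int × Int × Int),
    (splitP 'A' l).2.foldl gA ((splitP 'A' l).1.foldl bstep (bump a)) = l.foldl stepScan (bump a) := by
  intro l
  induction l with
  | nil => intro a; simp [splitP]
  | cons x rest ih =>
    intro a
    by_cases hx : x = 'A'
    · subst hx
      rw [show splitP 'A' ('A' :: rest) = ([], (splitP 'A' rest).1 :: (splitP 'A' rest).2) from by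
        simp [splitP]]
      have h1 : gA (bump a) (splitP 'A' rest).1
          = (splitP 'A' rest).1.foldl bstep (bump (a.1 + 2, 0, a.1 + 1)) := by
        simp only [gA, bump]
        ring_nf
      have h2 : stepScan (bump a) 'A' = bump (a.1 + 2, 0, a.1 + 1) := by
        simp [stepScan, bump, Prod.ext_iff]
        omega
      rw [List.foldl_nil, List.foldl_cons, List.foldl_cons, h1, h2, ih]
    · rw [show splitP 'A' (x :: rest) = (x :: (splitP 'A' rest).1, (splitP 'A' rest).2) from by
        simp [splitP, hx]]
      obtain ⟨a', ha'⟩ := bstep_bump_ex a x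
      rw [List.foldl_cons, List.foldl_cons, ha', ih, stepScan_eq_bstep _ _ hx, ha']
lemma runA_eq (l : List Char) (a : Int × Int × Int) :
    (PySem.List.enumerate (PySem.Chars.splitOn l ['A'])).foldl pA a = l.foldl stepScan (bump a) := by
  have hg : ∀ (b : Int × Int × Int) (p : List Char) (i : Int), i ≠ 0 → pA b (i, p) = gA b p := by
    intro b p i hi
    simp only [pA, gA, if_pos hi, runB_eq]
    congr 1
    simp [bump, Prod.ext_iff]
    omega
  rw [splitOn_single, PySem.List.enumerate_cons, List.foldl_cons,
    foldl_enumerate_pos pA gA hg _ _ (0 + 1) (by omega)]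
  have h0 : pA a (0, (splitP 'A' l).1) = (splitP 'A' l).1.foldl bstep (bump a) := by
    simp only [pA, if_neg (by omega : ¬ ((0 : Int), (splitP 'A' l).1).1 ≠ 0), runB_eq]
  rw [h0, MA0]
-- ===== VERDICT (by name: the statement is the Claim_ definition above) =====
theorem process1_1_spec : Claim_equal_process1_1 := by
  intro txt _
  unfold Spec_process1_1
  dsimp only [process1_1, process1_1_alt]
  have key : ∀ (l : List (Int × List Char)) (s : List (List Char) × Int × Int),
      absSt (l.foldl procA s) = l.foldl pA (absSt s) := by
    intro l s
    exact (List.foldl_hom absSt (fun x y => (abs_procA x y).symm)).symm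
  have habs : absSt ((PySem.List.enumerate (PySem.Chars.splitOn txt.toList ['A'])).foldl procA
        ([], 1, 1)) = txt.toList.foldl stepScan (1, 1, 1) := by
    rw [key, runA_eq]
    norm_num [absSt, bump]
  have h21 : ((PySem.List.enumerate (PySem.Chars.splitOn txt.toList ['A'])).foldl procA
        ([], 1, 1)).2 = (txt.toList.foldl stepScan (1, 1, 1)).2 := by
    rw [← habs]; rfl
  have hlen : ((PySem.Chars.splitOn txt.toList ['A']).length : Int)
      = (txt.toList.count 'A' : Int) + 1 := by
    rw [splitOn_single]
    simp [splitP_snd_length]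
  have hcnt : PySem.Str.count txt "A" = txt.toList.count 'A' := by
    rw [PySem.Str.count_eq]
    have : ("A" : String).toList = ['A'] := rfl
    rw [this, count_single]
  rw [hlen, h21, hcnt]
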